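-- pv_equiv track=rewrite | github.com/aryanshdev/NumberTypes | src/numbertypes.py | emirp
-- ===== SOURCE A (Python) =====
-- def prime(number):
--     '''return True if number is a Prime number else false'''
--     c = 0
--     for i in range(1, number + 1):
--         if number % i == 0:
--             c += 1
--     if c == 2:
--         return (True)
--     else:
--         return (False)
--
-- def emirp(number):
--     '''return True if number is a Emirp number else false'''
--     v = 0
--     g = prime(number)
--     while number > 0:
--         d = number % 10
--         v = (v * 10) + d
--         number //= 10
--     if prime(v) == True and g == True:
--         return (True)
--     else:
--         return (False)
-- ===== SOURCE B (Python) =====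
-- def _is_prime(n):
--     '''trial division up to sqrt(n)'''
--     if n < 2:
--         return False
--     i = 2
--     while i * i <= n:
--         if n % i == 0:
--             return False
--         i += 1
--     return True
--
-- def emirp(number):
--     '''return True if number is a Emirp number else false'''
--     if not _is_prime(number):
--         return False
--     rev = 0
--     n = number
--     while n > 0:
--         rev = rev * 10 + n % 10
--         n //= 10
--     return _is_prime(rev)
-- ===== Notes on version B (the rewrite author's own statement) =====
-- stated objective: faster
-- what changed: Primality is decided by trial division up to sqrt(n) with short-circuit (skip the digit reversal when the number itself is not prime), instead of counting all divisors from 1 to n twice.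
import Mathlib
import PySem

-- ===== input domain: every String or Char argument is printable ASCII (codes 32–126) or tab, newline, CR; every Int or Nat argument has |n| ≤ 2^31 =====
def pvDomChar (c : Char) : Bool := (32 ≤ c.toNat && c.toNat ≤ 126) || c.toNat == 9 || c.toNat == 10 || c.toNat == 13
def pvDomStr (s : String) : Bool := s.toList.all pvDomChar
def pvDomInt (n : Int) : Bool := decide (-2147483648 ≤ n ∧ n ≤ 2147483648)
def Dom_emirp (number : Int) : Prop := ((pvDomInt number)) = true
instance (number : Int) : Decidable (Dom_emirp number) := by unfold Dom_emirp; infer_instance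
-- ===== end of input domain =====

-- B replaces A's divisor-counting primality test (count all i in 1..n dividing n, computed for
-- the number and its reversal) by trial division up to sqrt(n) with short-circuit; objective: faster.


-- ===== PORT A =====
-- A's prime(number): count every i in range(1, number+1) with number % i == 0, return c == 2
def pvPrimeA (number : Int) : Bool :=
  let c : Int := (PySem.List.pyRange 1 (number + 1) 1).foldl
    (fun c i => if PySem.Int.mod number i = 0 then c + 1 else c) 0
  c == 2

-- A's while loop: v = v*10 + number % 10; number //= 10
def pvRevA (number v : Int) : Int :=
  if number > 0 then
    pvRevA (PySem.Int.floordiv number 10) (v * 10 + PySem.Int.mod number 10)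
  else v
termination_by number.toNat
decreasing_by
  rename_i h
  rw [PySem.Int.floordiv_eq_ediv_of_pos (by norm_num : (0:Int) < 10)]
  omega

def emirp (number : Int) : Bool :=
  let g := pvPrimeA number
  let v := pvRevA number 0
  if pvPrimeA v && g then true else false

-- ===== PORT B =====
-- B's _is_prime: guard n < 2, then while i*i <= n: if n % i == 0 return False; i += 1
def pvTrialB (n i : Int) : Bool :=
  if i * i ≤ n then
    if PySem.Int.mod n i = 0 then false
    else pvTrialB n (i + 1)
  else true
termination_by (n + 1 - i).toNat
decreasing_by
  rename_i h _
  have hi : i ≤ n := by nlinarith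
  omega

def pvIsPrimeB (n : Int) : Bool :=
  if n < 2 then false else pvTrialB n 2

-- B's while loop: rev = rev*10 + n % 10; n //= 10
def pvRevB (n rev : Int) : Int :=
  if n > 0 then
    pvRevB (PySem.Int.floordiv n 10) (rev * 10 + PySem.Int.mod n 10)
  else rev
termination_by n.toNat
decreasing_by
  rename_i h
  rw [PySem.Int.floordiv_eq_ediv_of_pos (by norm_num : (0:Int) < 10)]
  omega

def emirp_alt (number : Int) : Bool :=
  if !pvIsPrimeB number then false
  else pvIsPrimeB (pvRevB number 0)

-- ===== PRECONDITION & SPEC =====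
def Spec_emirp (number : Int) (out : Bool) : Prop := out = emirp_alt number
instance (number : Int) (out : Bool) : Decidable (Spec_emirp number out) := by unfold Spec_emirp; infer_instance

-- ===== CLAIM (what is proved, stated in full; the proofs are below) =====
def Claim_equal_emirp : Prop := ∀ (number : Int), Dom_emirp number → Spec_emirp number (emirp number)

-- ===== LEMMAS AND PROOFS =====

-- the two reversal loops are the same recursion
theorem rev_eq (n v : Int) : pvRevB n v = pvRevA n v := by
  fun_induction pvRevA n v with
  | case1 n v h ih => rw [pvRevB, if_pos h]; exact ih
  | case2 n v h => rw [pvRevB, if_neg h]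

theorem countP_range_eq_card (m : Nat) (p : Nat → Bool) :
    (List.range m).countP p = ((Finset.range m).filter (fun k => p k)).card := by
  rw [List.countP_eq_length_filter, Finset.card, Finset.filter_val, Finset.range_val,
    ← Multiset.coe_range, Multiset.filter_coe, Multiset.coe_card]
  simp

theorem card_filter_eq_card_divisors (m : Nat) (hm : 1 ≤ m) :
    ((Finset.range m).filter (fun k => decide ((k+1) ∣ m) = true)).card = m.divisors.card := by
  refine Finset.card_bij' (fun k _ => k + 1) (fun d _ => d - 1) ?_ ?_ ?_ ?_
  · intro k hk
    simp only [Finset.mem_filter, Finset.mem_range, decide_eq_true_eq] at hk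
    exact Nat.mem_divisors.2 ⟨hk.2, by omega⟩
  · intro d hd
    rw [Nat.mem_divisors] at hd
    have h1 : 1 ≤ d := Nat.one_le_iff_ne_zero.2 (fun h => hd.2 (by simpa [h] using hd.1))
    have h2 : d ≤ m := Nat.le_of_dvd (by omega) hd.1
    simp only [Finset.mem_filter, Finset.mem_range, decide_eq_true_eq]
    refine ⟨by omega, ?_⟩
    rw [Nat.sub_add_cancel h1]; exact hd.1
  · intro k _; show k + 1 - 1 = k; omega
  · intro d hd
    rw [Nat.mem_divisors] at hd
    have h1 : 1 ≤ d := Nat.one_le_iff_ne_zero.2 (fun h => hd.2 (by simpa [h] using hd.1))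
    show d - 1 + 1 = d; omega

theorem card_divisors_two_iff (m : Nat) (hm : 2 ≤ m) : m.divisors.card = 2 ↔ m.Prime := by
  constructor
  · intro hc
    have hsub : ({1, m} : Finset Nat) ⊆ m.divisors := by
      intro d hd
      simp only [Finset.mem_insert, Finset.mem_singleton] at hd
      rcases hd with rfl | rfl
      · exact Nat.one_mem_divisors.2 (by omega)
      · exact Nat.mem_divisors.2 ⟨dvd_rfl, by omega⟩
    have hne : (1 : Nat) ∉ ({m} : Finset Nat) := by
      simp only [Finset.mem_singleton]; omega
    have hcard2 : ({1, m} : Finset Nat).card = 2 := by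
      rw [Finset.card_insert_of_notMem hne, Finset.card_singleton]
    have heq : m.divisors = {1, m} :=
      (Finset.eq_of_subset_of_card_le hsub (by omega)).symm
    rw [Nat.prime_def]
    refine ⟨hm, fun d hd => ?_⟩
    have hdm : d ∈ m.divisors := Nat.mem_divisors.2 ⟨hd, by omega⟩
    rw [heq] at hdm
    simpa using hdm
  · intro hp
    rw [hp.divisors]
    have hne : (1 : Nat) ∉ ({m} : Finset Nat) := by
      simp only [Finset.mem_singleton]; omega
    rw [Finset.card_insert_of_notMem hne, Finset.card_singleton]

theorem primeA_iff (m : Nat) (hm : 2 ≤ m) : pvPrimeA (m : Int) = true ↔ Nat.Prime m := by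
  simp only [pvPrimeA]
  have hf := PySem.List.foldl_count_if (fun i => decide (PySem.Int.mod (m : Int) i = 0))
      (PySem.List.pyRange 1 ((m : Int) + 1) 1) 0
  simp only [decide_eq_true_eq] at hf
  rw [hf]
  have hr : PySem.List.pyRange 1 ((m : Int) + 1) 1
      = (List.range m).map (fun k : Nat => 1 + (k : Int)) := by
    apply List.ext_getElem
    · simp [PySem.List.length_pyRange_one]
    · intro k h1 h2
      simp [PySem.List.getElem_pyRange_one]
  rw [hr, List.countP_map]
  have hpred : ∀ k ∈ List.range m,
      (((fun i => decide (PySem.Int.mod (m : Int) i = 0)) ∘ (fun k : Nat => 1 + (k : Int))) k = true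
        ↔ (fun k : Nat => decide ((k+1) ∣ m)) k = true) := by
    intro k _
    simp only [Function.comp_apply, decide_eq_true_eq, PySem.Int.mod_eq_zero_iff_dvd]
    rw [show (1 + (k : Int)) = ((k+1 : Nat) : Int) by push_cast; ring]
    exact Int.natCast_dvd_natCast
  rw [List.countP_congr hpred]
  rw [countP_range_eq_card, card_filter_eq_card_divisors m (by omega)]
  rw [← card_divisors_two_iff m hm]
  simp only [beq_iff_eq]
  omega

theorem trialB_iff (n i : Int) (hi : 2 ≤ i) :
    pvTrialB n i = true ↔ ∀ j : Int, i ≤ j → j * j ≤ n → ¬ (j ∣ n) := by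
  fun_induction pvTrialB n i with
  | case1 i h hd =>
      simp only [Bool.false_eq_true, false_iff]
      intro H
      exact H i (le_refl i) h ((PySem.Int.mod_eq_zero_iff_dvd n i).1 hd)
  | case2 i h hd ih =>
      rw [ih (by omega)]
      constructor
      · intro H j hj hjj
        rcases eq_or_lt_of_le hj with rfl | hlt
        · exact fun hdvd => hd ((PySem.Int.mod_eq_zero_iff_dvd n i).2 hdvd)
        · exact H j (by omega) hjj
      · intro H j hj hjj
        exact H j (by omega) hjj
  | case3 i h =>
      simp only [true_iff]
      intro j hj hjj hdvd
      have hsq : i ≤ j → i * i ≤ j * j := by intro _; nlinarith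
      exact h (le_trans (hsq hj) hjj)

theorem primeB_iff (m : Nat) (hm : 2 ≤ m) : pvIsPrimeB (m : Int) = true ↔ Nat.Prime m := by
  rw [pvIsPrimeB, if_neg (by omega : ¬((m : Int) < 2))]
  rw [trialB_iff (m : Int) 2 (le_refl 2)]
  rw [Nat.prime_def_le_sqrt]
  constructor
  · intro H
    refine ⟨hm, fun j h2j hsq hdvd => ?_⟩
    exact H (j : Int) (by exact_mod_cast h2j) (by exact_mod_cast (Nat.le_sqrt.1 hsq))
      (Int.natCast_dvd_natCast.2 hdvd)
  · rintro ⟨-, H⟩ j h2j hjj hdvd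
    obtain ⟨jn, rfl⟩ : ∃ jn : Nat, j = ↑jn := ⟨j.toNat, by omega⟩
    exact H jn (by exact_mod_cast h2j) (Nat.le_sqrt.2 (by exact_mod_cast hjj))
      (Int.natCast_dvd_natCast.1 hdvd)

theorem prime_eq (n : Int) : pvPrimeA n = pvIsPrimeB n := by
  rcases lt_or_ge n 2 with h | h
  · have hB : pvIsPrimeB n = false := by rw [pvIsPrimeB, if_pos h]
    rcases lt_or_ge n 1 with h0 | h1
    · have hnil : PySem.List.pyRange 1 (n+1) 1 = [] := PySem.List.pyRange_one_eq_nil (by omega)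
      simp [pvPrimeA, hnil, hB]
    · have hn1 : n = 1 := by omega
      subst hn1; rw [hB]; decide
  · obtain ⟨m, rfl⟩ : ∃ m : Nat, n = ↑m := ⟨n.toNat, by omega⟩
    have hm : 2 ≤ m := by exact_mod_cast h
    have h1 := primeA_iff m hm
    have h2 := primeB_iff m hm
    cases hA : pvPrimeA (m : Int) <;> cases hBv : pvIsPrimeB (m : Int) <;> simp_all

-- ===== VERDICT (by name: the statement is the Claim_ definition above) =====
theorem emirp_spec : Claim_equal_emirp := by
  intro number _
  unfold Spec_emirp
  simp only [emirp, emirp_alt, rev_eq, prime_eq]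
  cases pvIsPrimeB number <;> cases pvIsPrimeB (pvRevA number 0) <;> simp
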